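-- pv_equiv track=rewrite | github.com/717eunhye/Lecture_book_etc | Coding_test/Level1/Programmers_08.py | solution
-- ===== SOURCE A (Python) =====
-- def solution(n):
--     answer=""
--     T="0123456789ABCDEF"
--     q, r = divmod(n, 3)
--     answer += str(r)
--
--     while q !=0 :
--         if q ==0:
--             answer = T[r]
--         else:
--             q, r = divmod(q, 3)
--             answer += str(r)
--
--     return int(answer, 3)
-- ===== SOURCE B (Python) =====
-- def solution(n):
--     # Reverse n's base-3 digits by scanning them most-significant-first:
--     # p walks down the powers of 3 (starting at the highest power <= n),
--     # while m walks up the mirrored weights; n itself is never modified.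
--     p = 1
--     while p * 3 <= n:
--         p *= 3
--     result = 0
--     m = 1
--     while p > 0:
--         result += (n // p % 3) * m
--         p //= 3
--         m *= 3
--     return result
-- ===== Notes on version B (the rewrite author's own statement) =====
-- stated objective: alternative
-- what changed: Instead of A's LSB-first divmod peeling into a decimal string reparsed with int(answer,3), B never mutates n: it finds the highest power of 3 <= n and reads the digits most-significant-first by division by that descending power, placing each at an ascending mirrored weight.
import Mathlib
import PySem

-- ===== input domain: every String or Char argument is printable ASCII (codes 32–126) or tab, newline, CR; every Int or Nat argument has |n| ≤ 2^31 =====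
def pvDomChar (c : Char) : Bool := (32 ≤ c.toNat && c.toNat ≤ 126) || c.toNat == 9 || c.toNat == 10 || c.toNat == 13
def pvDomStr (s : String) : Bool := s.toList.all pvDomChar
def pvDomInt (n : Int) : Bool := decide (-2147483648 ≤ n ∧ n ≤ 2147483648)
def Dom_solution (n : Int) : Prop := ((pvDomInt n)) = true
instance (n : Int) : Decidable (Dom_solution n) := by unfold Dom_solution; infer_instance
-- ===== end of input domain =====

-- B drops A's decimal-string round-trip (LSB-first divmod peeling + int(answer,3) reparse)
-- and instead scans the base-3 digits most-significant-first (dividing by a descending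
-- precomputed power of 3) while placing them at ascending mirrored weights; objective:
-- alternative (a different traversal, no strings). Pre_solution: n ≥ 0 (A loops forever
-- on negative n).


-- ===== PORT A =====
-- int(answer, 3), ported by hand as the left-to-right base-3 digit fold; exact on the
-- nonempty '0'..'2' digit strings A builds for every n ≥ 0 (all that reach it inside Pre_).
def pvParse3 (cs : List Char) (acc : Int) : Int :=
  match cs with
  | [] => acc
  | c :: rest => pvParse3 rest (acc * 3 + ((c.toNat : Int) - 48))

-- `while q != 0: q, r = divmod(q, 3); answer += str(r)` — the inner `if q == 0` branch
-- (with the unused table T) is unreachable under the loop guard and is omitted; the guard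
-- is written `0 < q` because for q < 0 the Python loop never terminates (outside Pre_).
def pvLoopA (q : Int) (answer : String) : String :=
  if _h : 0 < q then
    pvLoopA (PySem.Int.floordiv q 3) (answer ++ PySem.Int.toStr (PySem.Int.mod q 3))
  else answer
termination_by q.toNat
decreasing_by
  have h3 : PySem.Int.floordiv q 3 = q / 3 := PySem.Int.floordiv_eq_ediv_of_pos (by norm_num)
  rw [h3]; omega

def solution (n : Int) : Int :=
  -- q, r = divmod(n, 3); answer = "" + str(r); then the loop; then int(answer, 3)
  pvParse3 (pvLoopA (PySem.Int.floordiv n 3) ("" ++ PySem.Int.toStr (PySem.Int.mod n 3))).toList 0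

-- ===== PORT B =====
-- `p = 1; while p * 3 <= n: p *= 3` — the proof argument only serves termination.
def pvFindP (n : Int) (p : Int) (hp : 0 < p) : Int :=
  if _h : p * 3 ≤ n then pvFindP n (p * 3) (by omega) else p
termination_by (n - p).toNat
decreasing_by omega

-- `while p > 0: result += (n // p % 3) * m; p //= 3; m *= 3`
def pvLoopB (n p m result : Int) : Int :=
  if _h : 0 < p then
    pvLoopB n (PySem.Int.floordiv p 3) (m * 3)
      (result + PySem.Int.mod (PySem.Int.floordiv n p) 3 * m)
  else result
termination_by p.toNat
decreasing_by
  have h3 : PySem.Int.floordiv p 3 = p / 3 := PySem.Int.floordiv_eq_ediv_of_pos (by norm_num)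
  rw [h3]; omega

def solution_alt (n : Int) : Int :=
  pvLoopB n (pvFindP n 1 (by norm_num)) 1 0

-- ===== PRECONDITION & SPEC =====
-- Python A loops forever when n < 0 (divmod keeps the quotient at -1), so negative n is
-- excluded; A returns normally on every n ≥ 0.
def Pre_solution (n : Int) : Prop := 0 ≤ n
instance (n : Int) : Decidable (Pre_solution n) := by unfold Pre_solution; infer_instance
def pvWitness_solution : Int := 45

def Spec_solution (n : Int) (out : Int) : Prop := out = solution_alt n
instance (n : Int) (out : Int) : Decidable (Spec_solution n out) := by unfold Spec_solution; infer_instance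

-- ===== CLAIM (what is proved, stated in full; the proofs are below) =====
def Claim_equal_solution : Prop := ∀ (n : Int), Dom_solution n → Pre_solution n → Spec_solution n (solution n)

-- ===== LEMMAS AND PROOFS =====

-- The base-3 digit list of n, LSB first (a proof-side object; neither port computes it).
def pvDigits3 (n : Int) : List Int :=
  if _h : 0 < n then
    PySem.Int.mod n 3 :: pvDigits3 (PySem.Int.floordiv n 3)
  else []
termination_by n.toNat
decreasing_by
  have h3 : PySem.Int.floordiv n 3 = n / 3 := PySem.Int.floordiv_eq_ediv_of_pos (by norm_num)
  rw [h3]; omega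

-- poly [e0, e1, ...] = e0 + 3*e1 + 9*e2 + ...
def pvPoly : List Int → Int
  | [] => 0
  | d :: ds => d + 3 * pvPoly ds

-- [d_t, d_{t-1}, ..., d_0] where d_j = n / 3^j % 3 (MSB first, length t+1)
def pvRList (n : Int) : Nat → List Int
  | 0 => [n % 3]
  | t + 1 => (n / 3 ^ (t + 1) % 3) :: pvRList n t

-- [d_0, ..., d_t] (LSB first, length t+1)
def pvDList (n : Int) : Nat → List Int
  | 0 => [n % 3]
  | t + 1 => n % 3 :: pvDList (n / 3) t

def pvDChar (d : Int) : Char := Char.ofNat (48 + d.toNat)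

theorem pvToStr_digit (d : Int) (h0 : 0 ≤ d) (h3 : d < 3) :
    (PySem.Int.toStr d).toList = [pvDChar d] := by
  interval_cases d <;> decide

theorem pvDigits3_bound (n : Int) : ∀ d ∈ pvDigits3 n, 0 ≤ d ∧ d < 3 := by
  induction n using pvDigits3.induct with
  | case1 n h ih =>
      rw [pvDigits3, dif_pos h]
      intro d hd
      rcases List.mem_cons.mp hd with hd | hd
      · exact hd ▸ ⟨PySem.Int.mod_nonneg _ (by norm_num), PySem.Int.mod_lt _ (by norm_num)⟩
      · exact ih d hd
  | case2 n h =>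
      rw [pvDigits3, dif_neg h]; intro d hd; cases hd

theorem pvLoopA_chars (q : Int) (ans : String) :
    (pvLoopA q ans).toList = ans.toList ++ (pvDigits3 q).map pvDChar := by
  induction q using pvDigits3.induct generalizing ans with
  | case1 q h ih =>
      rw [pvLoopA, dif_pos h, pvDigits3, dif_pos h]
      rw [ih]
      rw [String.toList_append,
        pvToStr_digit _ (PySem.Int.mod_nonneg _ (by norm_num)) (PySem.Int.mod_lt _ (by norm_num))]
      simp
  | case2 q h =>
      rw [pvLoopA, dif_neg h, pvDigits3, dif_neg h]
      simp

theorem pvParse3_map (ds : List Int) (acc : Int) (hb : ∀ d ∈ ds, 0 ≤ d ∧ d < 3) :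
    pvParse3 (ds.map pvDChar) acc = ds.foldl (fun result d => result * 3 + d) acc := by
  induction ds generalizing acc with
  | nil => rfl
  | cons d ds ih =>
      obtain ⟨h0, h3⟩ := hb d (List.mem_cons_self ..)
      have hc : ((pvDChar d).toNat : Int) - 48 = d := by
        interval_cases d <;> decide
      simp only [List.map_cons, pvParse3, List.foldl_cons, hc]
      exact ih _ (fun e he => hb e (List.mem_cons_of_mem _ he))

-- A's Horner fold over the LSB-first list equals pvPoly of the reversed list.
theorem pvPoly_append (xs : List Int) (d : Int) :
    pvPoly (xs ++ [d]) = pvPoly xs + d * 3 ^ xs.length := by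
  induction xs with
  | nil => simp [pvPoly]
  | cons x xs ih => simp [pvPoly, ih]; ring

theorem pvFoldl_poly (ds : List Int) (a : Int) :
    ds.foldl (fun result d => result * 3 + d) a = a * 3 ^ ds.length + pvPoly ds.reverse := by
  induction ds generalizing a with
  | nil => simp [pvPoly]
  | cons d ds ih =>
      simp only [List.foldl_cons, List.reverse_cons, ih, pvPoly_append,
        List.length_reverse, List.length_cons]
      ring

-- pvDigits3 n is exactly the LSB-first digit window when 3^t ≤ n < 3^(t+1)
theorem pvDigits3_eq_dlist (t : Nat) : ∀ n : Int, 3 ^ t ≤ n → n < 3 ^ (t + 1) →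
    pvDigits3 n = pvDList n t := by
  induction t with
  | zero =>
      intro n h1 h2
      simp only [pow_zero] at h1 h2
      rw [pvDigits3, dif_pos (by omega), pvDigits3]
      rw [dif_neg (by
        rw [PySem.Int.floordiv_eq_ediv_of_pos (show (0:Int) < 3 by norm_num)]
        omega)]
      simp [pvDList]
  | succ t ih =>
      intro n h1 h2
      have hpos : 0 < n := lt_of_lt_of_le (by positivity) h1
      have hfd : PySem.Int.floordiv n 3 = n / 3 :=
        PySem.Int.floordiv_eq_ediv_of_pos (by norm_num)
      have hm : PySem.Int.mod n 3 = n % 3 :=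
        PySem.Int.mod_eq_emod_of_pos (by norm_num)
      rw [pvDigits3, dif_pos hpos, hfd, hm]
      have h1' : (3:Int) ^ t ≤ n / 3 := by
        rw [Int.le_ediv_iff_mul_le (by norm_num)]
        calc (3:Int) ^ t * 3 = 3 ^ (t+1) := by ring
        _ ≤ n := h1
      have h2' : n / 3 < 3 ^ (t + 1) := by
        rw [Int.ediv_lt_iff_lt_mul (by norm_num)]
        calc n < 3 ^ (t+2) := h2
        _ = 3 ^ (t+1) * 3 := by ring
      rw [ih (n / 3) h1' h2']
      rfl

theorem pvRList_shift (t : Nat) (n : Int) :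
    pvRList n (t + 1) = pvRList (n / 3) t ++ [n % 3] := by
  induction t with
  | zero => simp [pvRList, pow_one]
  | succ t ih =>
      have hdd : n / 3 ^ (t + 2) = (n / 3) / 3 ^ (t + 1) := by
        rw [Int.ediv_ediv_of_nonneg (by norm_num : (0:Int) ≤ 3)]
        congr 1; ring
      calc pvRList n (t + 2) = (n / 3 ^ (t + 2) % 3) :: pvRList n (t + 1) := rfl
        _ = ((n / 3) / 3 ^ (t + 1) % 3) :: (pvRList (n / 3) t ++ [n % 3]) := by rw [hdd, ih]
        _ = pvRList (n / 3) (t + 1) ++ [n % 3] := rfl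

theorem pvRList_eq_reverse (t : Nat) : ∀ n : Int, pvRList n t = (pvDList n t).reverse := by
  induction t with
  | zero => intro n; simp [pvRList, pvDList]
  | succ t ih =>
      intro n
      rw [pvRList_shift, ih (n / 3)]
      simp [pvDList]

-- B's digit loop computes result + m * pvPoly (pvRList n t) when started at p = 3^t.
theorem pvLoopB_poly (t : Nat) : ∀ n m result : Int,
    pvLoopB n (3 ^ t) m result = result + m * pvPoly (pvRList n t) := by
  induction t with
  | zero =>
      intro n m result
      rw [pvLoopB, dif_pos (by norm_num), pvLoopB, dif_neg (by decide)]
      simp [pvPoly, pvRList]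
      ring
  | succ t ih =>
      intro n m result
      have hp : (0:Int) < 3 ^ (t + 1) := by positivity
      have hfd : PySem.Int.floordiv ((3:Int) ^ (t + 1)) 3 = 3 ^ t := by
        rw [PySem.Int.floordiv_eq_ediv_of_pos (by norm_num), pow_succ,
          Int.mul_ediv_cancel _ (by norm_num)]
      rw [pvLoopB, dif_pos hp, hfd, ih]
      simp [pvRList, pvPoly]
      ring

-- pvFindP returns the largest power of 3 that is ≤ n (for 1 ≤ n).
theorem pvFindP_pow (n p : Int) (hp : 0 < p) :
    ∀ s : Nat, p = 3 ^ s → p ≤ n →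
      ∃ t : Nat, pvFindP n p hp = 3 ^ t ∧ 3 ^ t ≤ n ∧ n < 3 ^ (t + 1) := by
  refine pvFindP.induct n
    (motive := fun p hp => ∀ s : Nat, p = 3 ^ s → p ≤ n →
      ∃ t : Nat, pvFindP n p hp = 3 ^ t ∧ 3 ^ t ≤ n ∧ n < 3 ^ (t + 1)) ?_ ?_ p hp
  · intro p hp h ih s hs hle
    rw [pvFindP]
    split
    · exact ih (s + 1) (by rw [hs]; ring) h
    · omega
  · intro p hp h s hs hle
    rw [pvFindP]
    split
    · omega
    · exact ⟨s, hs, hs ▸ hle, by rw [show (3:Int)^(s+1) = 3^s * 3 by ring, ← hs]; omega⟩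

-- ===== VERDICT (by name: the statement is the Claim_ definition above) =====
theorem solution_spec : Claim_equal_solution := by
  intro n _ hn
  unfold Pre_solution at hn
  unfold Spec_solution solution solution_alt
  have hr0 := PySem.Int.mod_nonneg n (show (0:Int) < 3 by norm_num)
  have hr3 := PySem.Int.mod_lt n (show (0:Int) < 3 by norm_num)
  rw [pvLoopA_chars, String.toList_append, pvToStr_digit _ hr0 hr3]
  have hmap : ("".toList ++ [pvDChar (PySem.Int.mod n 3)]) ++ (pvDigits3 (PySem.Int.floordiv n 3)).map pvDChar
      = (PySem.Int.mod n 3 :: pvDigits3 (PySem.Int.floordiv n 3)).map pvDChar := by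
    simp
  rw [hmap, pvParse3_map _ _ ?bound]
  case bound =>
    intro d hd
    rcases List.mem_cons.mp hd with hd | hd
    · exact hd ▸ ⟨hr0, hr3⟩
    · exact pvDigits3_bound _ d hd
  rcases lt_or_eq_of_le hn with hpos | hzero
  · -- n ≥ 1: both sides are pvPoly (pvRList n t) for the t with 3^t ≤ n < 3^(t+1)
    have hA : PySem.Int.mod n 3 :: pvDigits3 (PySem.Int.floordiv n 3) = pvDigits3 n := by
      conv_rhs => rw [pvDigits3, dif_pos hpos]
    obtain ⟨t, hpt, h1, h2⟩ := pvFindP_pow n 1 (by norm_num) 0 (by norm_num) (by omega)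
    rw [hA, pvDigits3_eq_dlist t n h1 h2, pvFoldl_poly, hpt, pvLoopB_poly,
      ← pvRList_eq_reverse]
    ring
  · have h03 : PySem.Int.floordiv 0 3 = 0 := by decide
    have hm : PySem.Int.mod 0 3 = 0 := by decide
    have hfp : pvFindP 0 1 (by norm_num) = 1 := by
      rw [pvFindP, dif_neg (by norm_num)]
    have hB : pvLoopB 0 1 1 0 = 0 := by
      rw [pvLoopB, dif_pos (by norm_num), pvLoopB, dif_neg (by decide)]
      decide
    rw [← hzero, h03, hm, pvDigits3, dif_neg (by norm_num), hfp, hB]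
    simp
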